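-- pv_equiv track=rewrite | github.com/tomersult/Get-Cut | request/dayBook.py | check_if_this_hour_fit
-- ===== SOURCE A (Python) =====
-- def check_if_this_hour_fit(hours_dict, my_key, num_time_cycle):
--     counter = 0
--     flag = 0
--     hours_to_check = []
--     for key, value in hours_dict.items():
--         if counter == num_time_cycle:
--             break
--
--         if key == my_key:
--             flag = 1
--             hours_to_check.append(value)
--             counter += 1
--             continue
--
--         if flag == 0:
--             continue
--         else:
--             hours_to_check.append(value)
--             counter += 1
--
--     for val in hours_to_check:
--         if val:
--             return False
--     return True
-- ===== SOURCE B (Python) =====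
-- def check_if_this_hour_fit(hours_dict, my_key, num_time_cycle):
--     if my_key not in hours_dict:
--         return True
--     start = list(hours_dict).index(my_key)
--     values = list(hours_dict.values())
--     return not any(values[start:start + num_time_cycle])
-- ===== Notes on version B (the rewrite author's own statement) =====
-- stated objective: idiomatic
-- what changed: Replaces the flag/counter state machine that builds an intermediate list with a direct index lookup plus a slice of the value sequence checked with not any(...); Pre_ excludes negative num_time_cycle with my_key present, outside the natural domain of a cycle count, where A's break condition never fires by accident.
-- outside the precondition, e.g. on check_if_this_hour_fit({'a': 1}, 'a', -1): A returns False, B returns True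
import Mathlib
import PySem

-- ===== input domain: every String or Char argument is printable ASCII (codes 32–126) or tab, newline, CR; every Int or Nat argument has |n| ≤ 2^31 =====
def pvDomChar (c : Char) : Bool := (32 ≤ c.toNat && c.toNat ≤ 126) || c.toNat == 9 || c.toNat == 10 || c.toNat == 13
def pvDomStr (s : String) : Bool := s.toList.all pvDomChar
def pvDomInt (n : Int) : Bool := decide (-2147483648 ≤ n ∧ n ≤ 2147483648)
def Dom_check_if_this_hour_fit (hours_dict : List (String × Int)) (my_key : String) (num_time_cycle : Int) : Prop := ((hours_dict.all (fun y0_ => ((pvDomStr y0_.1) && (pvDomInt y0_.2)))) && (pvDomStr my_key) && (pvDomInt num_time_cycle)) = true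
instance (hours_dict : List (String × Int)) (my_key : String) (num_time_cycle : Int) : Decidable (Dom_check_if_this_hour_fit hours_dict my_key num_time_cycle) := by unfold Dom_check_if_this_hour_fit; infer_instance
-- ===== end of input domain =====

-- B replaces A's flag/counter state machine (building an intermediate list) with an
-- index lookup plus a slice over the value sequence; objective: idiomatic (same O(n) cost).

-- ===== PORT A =====
-- first loop of A: state (counter, flag, hours_to_check); 'break' = return acc
def chfLoop (my_key : String) (num_time_cycle : Int) :
    List (String × Int) → Int → Int → List Int → List Int
  | [], _, _, acc => acc
  | (k, v) :: resta, counter, flag, acc =>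
    if counter = num_time_cycle then acc
    else if k = my_key then chfLoop my_key num_time_cycle resta (counter + 1) 1 (acc ++ [v])
    else if flag = 0 then chfLoop my_key num_time_cycle resta counter flag acc
    else chfLoop my_key num_time_cycle resta (counter + 1) flag (acc ++ [v])

-- second loop of A: 'for val in hours_to_check: if val: return False' then True
def chfCheck : List Int → Bool
  | [] => true
  | v :: resta => if v ≠ 0 then false else chfCheck resta

def check_if_this_hour_fit (hours_dict : List (String × Int)) (my_key : String) (num_time_cycle : Int) : Bool :=
  chfCheck (chfLoop my_key num_time_cycle hours_dict 0 0 [])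

-- ===== PORT B =====
def check_if_this_hour_fit_alt (hours_dict : List (String × Int)) (my_key : String) (num_time_cycle : Int) : Bool :=
  match PySem.List.index? (hours_dict.map Prod.fst) my_key with  -- 'my_key not in hours_dict' / '.index(my_key)'
  | none => true
  | some start =>
    let values := hours_dict.map Prod.snd
    !((PySem.List.slice values (some (start : Int)) (some ((start : Int) + num_time_cycle))).any
        (fun v => v != 0))                                       -- 'not any(values[start:start+num_time_cycle])'

-- ===== PRECONDITION & SPEC =====
-- Pre_ excludes negative num_time_cycle when my_key is present: a negative cycle count
-- is outside the natural domain of the function, and there A's break condition never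
-- fires only by accident of the counter comparison, while B's negative slice bound is
-- equally accidental. (With my_key absent both return True regardless, so that stays in.)
def Pre_check_if_this_hour_fit (hours_dict : List (String × Int)) (my_key : String) (num_time_cycle : Int) : Prop :=
  0 ≤ num_time_cycle ∨ my_key ∉ hours_dict.map Prod.fst
instance (hours_dict : List (String × Int)) (my_key : String) (num_time_cycle : Int) : Decidable (Pre_check_if_this_hour_fit hours_dict my_key num_time_cycle) := by unfold Pre_check_if_this_hour_fit; infer_instance
def pvWitness_check_if_this_hour_fit : (List (String × Int)) × String × Int := ([("a", 1), ("b", 0)], "a", 1)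

def Spec_check_if_this_hour_fit (hours_dict : List (String × Int)) (my_key : String) (num_time_cycle : Int) (out : Bool) : Prop := out = check_if_this_hour_fit_alt hours_dict my_key num_time_cycle
instance (hours_dict : List (String × Int)) (my_key : String) (num_time_cycle : Int) (out : Bool) : Decidable (Spec_check_if_this_hour_fit hours_dict my_key num_time_cycle out) := by unfold Spec_check_if_this_hour_fit; infer_instance

-- ===== CLAIM (what is proved, stated in full; the proofs are below) =====
def Claim_equal_check_if_this_hour_fit : Prop := ∀ (hours_dict : List (String × Int)) (my_key : String) (num_time_cycle : Int), Dom_check_if_this_hour_fit hours_dict my_key num_time_cycle → Pre_check_if_this_hour_fit hours_dict my_key num_time_cycle → Spec_check_if_this_hour_fit hours_dict my_key num_time_cycle (check_if_this_hour_fit hours_dict my_key num_time_cycle)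

-- ===== LEMMAS AND PROOFS =====

-- A's second loop is 'no truthy element'
lemma chfCheck_eq_not_any (l : List Int) : chfCheck l = !(l.any (fun v => v != 0)) := by
  induction l with
  | nil => simp [chfCheck]
  | cons v resta ih =>
      by_cases hv : v = 0 <;> simp [chfCheck, hv, ih]

-- once flag = 1, A's first loop appends every value until counter reaches num_time_cycle
lemma chfLoop_flag1 (my_key : String) (n : Int) :
    ∀ (l : List (String × Int)) (c : Int) (acc : List Int),
      chfLoop my_key n l c 1 acc
        = acc ++ (l.map Prod.snd).take (if c ≤ n then (n - c).toNat else l.length) := by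
  intro l
  induction l with
  | nil => intro c acc; simp [chfLoop]
  | cons p resta ih =>
      intro c acc
      obtain ⟨k, v⟩ := p
      by_cases hc : c = n
      · simp [chfLoop, hc]
      · have h2 : chfLoop my_key n ((k, v) :: resta) c 1 acc
            = chfLoop my_key n resta (c + 1) 1 (acc ++ [v]) := by
          by_cases hk : k = my_key <;> simp [chfLoop, hc, hk]
        rw [h2, ih (c + 1) (acc ++ [v])]
        by_cases hcn : c ≤ n
        · have h3 : c + 1 ≤ n := by omega
          have h4 : (n - c).toNat = (n - (c + 1)).toNat + 1 := by omega
          simp [hcn, h3, h4, List.take_succ_cons]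
        · have h3 : ¬ (c + 1 ≤ n) := by omega
          simp [hcn, h3, List.take_succ_cons]

-- with num_time_cycle = 0 the loop breaks immediately (or the dict is empty)
lemma chfLoop_zero (my_key : String) (l : List (String × Int)) :
    chfLoop my_key 0 l 0 0 [] = [] := by
  cases l with
  | nil => simp [chfLoop]
  | cons p resta => obtain ⟨k, v⟩ := p; simp [chfLoop]

-- with my_key absent and flag stuck at 0, A's first loop never appends
lemma chfLoop_absent (my_key : String) (n : Int) :
    ∀ (l : List (String × Int)) (c : Int) (acc : List Int),
      my_key ∉ l.map Prod.fst → chfLoop my_key n l c 0 acc = acc := by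
  intro l
  induction l with
  | nil => intro c acc _; simp [chfLoop]
  | cons p resta ih =>
      intro c acc hmem
      obtain ⟨k, v⟩ := p
      simp only [List.map_cons, List.mem_cons, not_or] at hmem
      by_cases hc : c = n
      · simp [chfLoop, hc]
      · simp [chfLoop, hc, Ne.symm hmem.1, ih c acc hmem.2]

theorem check_if_this_hour_fit_eq (my_key : String) (n : Int) (hn0 : 0 ≤ n) :
    ∀ (l : List (String × Int)),
      check_if_this_hour_fit l my_key n = check_if_this_hour_fit_alt l my_key n := by
  by_cases hn : n = 0
  · -- zero window: both sides are true
    subst hn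
    intro l
    rw [check_if_this_hour_fit, chfLoop_zero]
    rw [check_if_this_hour_fit_alt]
    cases h : PySem.List.index? (l.map Prod.fst) my_key with
    | none => simp [chfCheck]
    | some s =>
        have hb : ((s : Int) + 0) = ((s : Nat) : Int) := by omega
        simp [chfCheck, hb, PySem.List.slice_natCast]
  · intro l
    induction l with
    | nil => simp [check_if_this_hour_fit, check_if_this_hour_fit_alt, chfLoop, chfCheck,
                   PySem.List.index?]
    | cons p resta ih =>
        obtain ⟨k, v⟩ := p
        by_cases hk : k = my_key
        · -- the key is found at the head: flag turns 1 right here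
          subst hk
          rw [check_if_this_hour_fit]
          have h1 : chfLoop k n ((k, v) :: resta) 0 0 []
              = chfLoop k n resta 1 1 [v] := by
            simp [chfLoop, Ne.symm hn]
          rw [h1, chfLoop_flag1, chfCheck_eq_not_any, check_if_this_hour_fit_alt]
          simp only [List.map_cons, PySem.List.index?_cons_self]
          have h2 : (1 : Int) ≤ n := by omega
          have e1 : PySem.List.slice (v :: resta.map Prod.snd) none (some n)
              = v :: (resta.map Prod.snd).take (n.toNat - 1) := by
            have h3 : n.toNat = (n.toNat - 1) + 1 := by omega
            rw [PySem.List.slice_to _ (by omega : (0:Int) ≤ n), h3, List.take_succ_cons]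
            simp
          simp [h2, e1]
        · -- head key differs: A skips it, B's index shifts by one
          have hA : check_if_this_hour_fit ((k, v) :: resta) my_key n
              = check_if_this_hour_fit resta my_key n := by
            rw [check_if_this_hour_fit, check_if_this_hour_fit]
            have : chfLoop my_key n ((k, v) :: resta) 0 0 []
                = chfLoop my_key n resta 0 0 [] := by
              simp [chfLoop, Ne.symm hn, hk]
            rw [this]
          rw [hA, ih]
          rw [check_if_this_hour_fit_alt, check_if_this_hour_fit_alt]
          simp only [List.map_cons]
          rw [PySem.List.index?_cons_of_ne _ hk]
          cases h : PySem.List.index? (resta.map Prod.fst) my_key with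
          | none => simp
          | some s =>
              simp only [Option.map_some]
              have e1 : PySem.List.slice (v :: resta.map Prod.snd)
                    (some ((s : Int) + 1)) (some ((s : Int) + 1 + n))
                  = PySem.List.slice (resta.map Prod.snd) (some ((s : Nat) : Int)) (some (((s : Nat) : Int) + n)) := by
                rw [PySem.List.slice_toNat _ (by omega) (by omega),
                    PySem.List.slice_toNat _ (by omega) (by omega)]
                have t1 : ((s : Int) + 1).toNat = s + 1 := by omega
                have t2 : ((s : Int) + 1 + n).toNat = s + 1 + n.toNat := by omega
                have t3 : (((s : Nat) : Int)).toNat = s := by omega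
                have t4 : (((s : Nat) : Int) + n).toNat = s + n.toNat := by omega
                rw [t1, t2, t3, t4, List.drop_succ_cons]
                congr 1
                omega
              simp [e1]

-- ===== VERDICT (by name: the statement is the Claim_ definition above) =====
theorem check_if_this_hour_fit_spec : Claim_equal_check_if_this_hour_fit := by
  intro hours_dict my_key num_time_cycle _ hpre
  unfold Spec_check_if_this_hour_fit
  rcases hpre with hn0 | habs
  · exact check_if_this_hour_fit_eq my_key num_time_cycle hn0 hours_dict
  · rw [check_if_this_hour_fit, chfLoop_absent my_key num_time_cycle hours_dict 0 [] habs,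
        check_if_this_hour_fit_alt]
    rw [(PySem.List.index?_eq_none_iff _ _).mpr habs]
    simp [chfCheck]
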